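-- pv_equiv track=rewrite | github.com/vineykhera/leetcode | funWithPalindrome.py | get_all_substrings
-- ===== SOURCE A (Python) =====
-- import math
--
-- def get_all_substrings(chars):
--     result = []
--     resultPos = []
--     binary = []
--     length = len(chars)
--     total = int(math.pow(2, length))
--
--     for i in range(1,total):
--         binaryNum = format(i, "b")
--         tempSubStr = []
--         tempSubStrPos = []
--
--         while (len(binaryNum) < length):
--             binaryNum = "0" + binaryNum
--         binary.append(binaryNum)
--
--         for j in range(0, length):
--             if "1" in binaryNum[j]:
--                 tempSubStr.append(chars[j])
--                 tempSubStrPos.append(j)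
--
--         newstr = ''.join(tempSubStr)
--         #result.append([newstr, len(newstr), tempSubStrPos[0], tempSubStrPos[-1]])
--         resultPos.append([tempSubStrPos[0], tempSubStrPos[-1]])
--         #if isPalindrome(newstr):
--         #if newstr not in result:
--         result.append(newstr)
--     return result, resultPos
-- ===== SOURCE B (Python) =====
-- def get_all_substrings(chars):
--     # Recursive power-set builder: at each index recurse without the char first,
--     # then with it (index 0 outermost), which reproduces the bitmask counting order.
--     result = []
--     resultPos = []
--     n = len(chars)
--
--     def go(i, sel, pos):
--         if i < n:
--             go(i + 1, sel, pos)
--             go(i + 1, sel + [chars[i]], pos + [i])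
--         elif sel:
--             result.append(''.join(sel))
--             resultPos.append([pos[0], pos[-1]])
--
--     go(0, [], [])
--     return result, resultPos
-- ===== Notes on version B (the rewrite author's own statement) =====
-- stated objective: simpler
-- what changed: Replaced the bitmask enumeration (format/zero-pad each i, then scan its digit string) with a direct recursive power-set builder that recurses exclude-then-include over the indices, carrying the selected chars and positions.
import Mathlib
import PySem

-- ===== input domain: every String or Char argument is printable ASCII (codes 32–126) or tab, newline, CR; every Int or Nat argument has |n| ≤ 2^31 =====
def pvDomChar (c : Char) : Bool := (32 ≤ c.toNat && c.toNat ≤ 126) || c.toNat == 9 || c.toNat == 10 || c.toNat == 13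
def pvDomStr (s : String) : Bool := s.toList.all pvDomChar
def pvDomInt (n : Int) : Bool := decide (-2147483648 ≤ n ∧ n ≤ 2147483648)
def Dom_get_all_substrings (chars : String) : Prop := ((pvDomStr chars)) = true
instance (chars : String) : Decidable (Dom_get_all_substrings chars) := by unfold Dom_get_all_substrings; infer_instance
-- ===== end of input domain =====

-- B replaces the bitmask enumeration (format/pad each i, scan its digit string) by a
-- recursive power-set builder over the indices (exclude-then-include); objective: simpler.

-- ===== PORT A =====

-- format(i, "b") for i ≥ 1 (the only arguments A passes: the loop starts at i = 1).
def pvBin (i : Nat) : List Char :=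
  if i = 0 then [] else pvBin (i / 2) ++ [if i % 2 = 1 then '1' else '0']

-- the `while len(binaryNum) < length: binaryNum = "0" + binaryNum` loop
def pvPad (s : List Char) (len : Nat) : List Char :=
  if s.length < len then pvPad ('0' :: s) len else s
termination_by len - s.length
decreasing_by simp_all; omega

-- the inner `for j in range(0, length)` loop ("1" in binaryNum[j] ↔ that char is '1';
-- j is always in range for both lists, so getD's default is never used)
def pvInner (cs bn : List Char) (len : Nat) : List Char × List Nat :=
  (List.range len).foldl (fun acc j =>
    if bn.getD j ' ' = '1' then (acc.1 ++ [cs.getD j ' '], acc.2 ++ [j]) else acc)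
    ([], [])

-- port of A; int(math.pow(2, length)) = 2^length exactly wherever Python returns.
-- tempSubStrPos is never empty when i ≥ 1, so headD/getLastD defaults are never used.
def get_all_substrings (chars : String) : List String × List (List Int) :=
  let cs := chars.toList
  let length := cs.length
  let total := 2 ^ length
  let r := (List.range' 1 (total - 1)).foldl
    (fun (st : List String × List (List Int) × List (List Char)) i =>
      let binaryNum := pvPad (pvBin i) length
      let t := pvInner cs binaryNum length
      (st.1 ++ [String.ofList t.1],
       st.2.1 ++ [[((t.2.headD 0 : Nat) : Int), ((t.2.getLastD 0 : Nat) : Int)]],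
       st.2.2 ++ [binaryNum]))
    ([], [], [])
  (r.1, r.2.1)

-- ===== PORT B =====

-- the recursive helper `go(i, sel, pos)`; the mutated result/resultPos lists of Source B
-- are threaded as the accumulator `acc`
def pvGoB (cs : List Char) (n : Nat) (i : Nat) (sel : List Char) (pos : List Nat)
    (acc : List String × List (List Int)) : List String × List (List Int) :=
  if i < n then
    pvGoB cs n (i + 1) (sel ++ [cs.getD i ' ']) (pos ++ [i])
      (pvGoB cs n (i + 1) sel pos acc)
  else if sel.isEmpty then acc
  else (acc.1 ++ [String.ofList sel], acc.2 ++ [[((pos.headD 0 : Nat) : Int), ((pos.getLastD 0 : Nat) : Int)]])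
termination_by n - i
decreasing_by all_goals omega

def get_all_substrings_alt (chars : String) : List String × List (List Int) :=
  pvGoB chars.toList chars.toList.length 0 [] [] ([], [])

-- ===== PRECONDITION & SPEC =====
def Spec_get_all_substrings (chars : String) (out : List String × List (List Int)) : Prop := out = get_all_substrings_alt chars
instance (chars : String) (out : List String × List (List Int)) : Decidable (Spec_get_all_substrings chars out) := by unfold Spec_get_all_substrings; infer_instance

-- ===== CLAIM (what is proved, stated in full; the proofs are below) =====
def Claim_equal_get_all_substrings : Prop := ∀ (chars : String), Dom_get_all_substrings chars → Spec_get_all_substrings chars (get_all_substrings chars)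

-- ===== LEMMAS AND PROOFS =====

-- bits of i, LSB last, zero-padded to width n
def pvToBits : Nat → Nat → List Bool
  | 0, _ => []
  | n + 1, i => pvToBits n (i / 2) ++ [decide (i % 2 = 1)]

def pvBChar (b : Bool) : Char := if b then '1' else '0'

-- all bit-vectors of width n in counting order (head = MSB)
def pvAllBits : Nat → List (List Bool)
  | 0 => [[]]
  | n + 1 => (pvAllBits n).map (false :: ·) ++ (pvAllBits n).map (true :: ·)

-- selection of a bit-vector from chars, positions offset by k
def pvSelo : List Bool → List Char → Nat → List Char × List Nat
  | [], _, _ => ([], [])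
  | _ :: _, [], _ => ([], [])
  | true :: bs, c :: cs, k =>
      let r := pvSelo bs cs (k + 1); (c :: r.1, k :: r.2)
  | false :: bs, c :: cs, k => pvSelo bs cs (k + 1)

def pvEmit (sel : List Char) (pos : List Nat) : List String × List (List Int) :=
  if sel.isEmpty then ([], [])
  else ([String.ofList sel], [[(pos.headD 0 : Int), (pos.getLastD 0 : Int)]])

def pvEmitAll (es : List (List Bool)) (cs : List Char) : List String × List (List Int) :=
  (es.flatMap (fun e => (pvEmit (pvSelo e cs 0).1 (pvSelo e cs 0).2).1),
   es.flatMap (fun e => (pvEmit (pvSelo e cs 0).1 (pvSelo e cs 0).2).2))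

theorem pvBin_len_le : ∀ n i, i < 2 ^ n → (pvBin i).length ≤ n := by
  intro n
  induction n with
  | zero => intro i h; interval_cases i; simp [pvBin]
  | succ n ih =>
    intro i h
    rw [pvBin]
    split
    · simp
    · have h2 : 2 ^ (n + 1) = 2 * 2 ^ n := by ring
      have := ih (i / 2) (by omega)
      simp [List.length_append]; omega

theorem pvPad_eq_aux : ∀ (k : Nat) (s : List Char) (n : Nat), n - s.length ≤ k →
    pvPad s n = List.replicate (n - s.length) '0' ++ s := by
  intro k
  induction k with
  | zero =>
    intro s n h
    rw [pvPad, if_neg (by omega)]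
    have : n - s.length = 0 := by omega
    simp [this]
  | succ k ih =>
    intro s n h
    by_cases hlt : s.length < n
    · rw [pvPad, if_pos hlt, ih ('0' :: s) n (by simp; omega)]
      have : n - s.length = (n - ('0' :: s).length) + 1 := by simp; omega
      rw [this, List.replicate_succ']
      simp
    · rw [pvPad, if_neg hlt]
      have : n - s.length = 0 := by omega
      simp [this]

theorem pvPad_eq (s : List Char) (n : Nat) :
    pvPad s n = List.replicate (n - s.length) '0' ++ s :=
  pvPad_eq_aux (n - s.length) s n le_rfl

theorem pvToBits_zero : ∀ n, pvToBits n 0 = List.replicate n false := by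
  intro n
  induction n with
  | zero => rfl
  | succ n ih => rw [pvToBits]; simp [ih, List.replicate_succ']

theorem pvPadBin : ∀ (n i : Nat), i < 2 ^ n →
    pvPad (pvBin i) n = (pvToBits n i).map pvBChar := by
  intro n
  induction n with
  | zero =>
    intro i h; interval_cases i
    simp [pvPad, pvBin, pvToBits]
  | succ n ih =>
    intro i h
    rw [pvPad_eq, pvBin]
    split
    · subst ‹i = 0›
      simp [pvToBits_zero, List.map_replicate, pvBChar, pvBin, List.replicate_succ']
    · have h2 : 2 ^ (n + 1) = 2 * 2 ^ n := by ring
      have hd : i / 2 < 2 ^ n := by omega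
      have hl := pvBin_len_le n (i / 2) hd
      have ihe := ih (i / 2) hd
      rw [pvPad_eq] at ihe
      rw [pvToBits]
      have hlen : n + 1 - ((pvBin (i / 2)).length + 1) = n - (pvBin (i / 2)).length := by omega
      simp only [List.length_append, List.length_cons, List.length_singleton, List.map_append,
        ← ihe, hlen]
      have : (if i % 2 = 1 then '1' else '0') = pvBChar (decide (i % 2 = 1)) := by
        by_cases hm : i % 2 = 1 <;> simp [hm, pvBChar]
      simp [this]

theorem pvFold_distrib (cs bn : List Char) :
    ∀ (l : List Nat) (r : List Char) (p : List Nat),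
    l.foldl (fun acc j =>
      if bn.getD j ' ' = '1' then (acc.1 ++ [cs.getD j ' '], acc.2 ++ [j]) else acc) (r, p)
    = (r ++ (l.foldl (fun acc j =>
        if bn.getD j ' ' = '1' then (acc.1 ++ [cs.getD j ' '], acc.2 ++ [j]) else acc) ([], [])).1,
       p ++ (l.foldl (fun acc j =>
        if bn.getD j ' ' = '1' then (acc.1 ++ [cs.getD j ' '], acc.2 ++ [j]) else acc) ([], [])).2) := by
  intro l
  induction l with
  | nil => simp
  | cons j l ih =>
    intro r p
    simp only [List.foldl_cons]
    by_cases hc : bn.getD j ' ' = '1'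
    · simp only [hc, ite_true, List.nil_append]
      rw [ih, ih [cs.getD j ' '] [j]]
      simp [List.append_assoc]
    · simp only [hc, ite_false]
      rw [ih]

theorem pvInner_aux (b : List Bool) (cs : List Char) (hlen : b.length = cs.length) :
    ∀ (m k : Nat), k + m = b.length →
    (List.range' k m).foldl (fun acc j =>
      if (b.map pvBChar).getD j ' ' = '1' then (acc.1 ++ [cs.getD j ' '], acc.2 ++ [j]) else acc)
      ([], [])
    = pvSelo (b.drop k) (cs.drop k) k := by
  intro m
  induction m with
  | zero =>
    intro k hk
    have h1 : b.drop k = [] := List.drop_of_length_le (by omega)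
    simp [h1, pvSelo]
  | succ m ih =>
    intro k hk
    have hkb : k < b.length := by omega
    have hkc : k < cs.length := by omega
    rw [List.range'_succ, List.foldl_cons, pvFold_distrib, ih (k + 1) (by omega)]
    have hdb : b.drop k = b[k] :: b.drop (k + 1) := List.drop_eq_getElem_cons hkb
    have hdc : cs.drop k = cs[k] :: cs.drop (k + 1) := List.drop_eq_getElem_cons hkc
    have hbn : (b.map pvBChar).getD k ' ' = pvBChar b[k] := by
      simp [List.getD, List.getElem?_eq_getElem, hkb]
    have hcs : cs.getD k ' ' = cs[k] := by
      simp [List.getD, List.getElem?_eq_getElem, hkc]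
    rw [hdb, hdc, hbn, hcs]
    cases hb : b[k] <;> simp [pvBChar, pvSelo]

theorem pvInner_eq (b : List Bool) (cs : List Char) (h : b.length = cs.length) :
    pvInner cs (b.map pvBChar) b.length = pvSelo b cs 0 := by
  have := pvInner_aux b cs h b.length 0 (by omega)
  simpa [pvInner, List.range_eq_range'] using this

theorem pvAllBits_succ (n : Nat) : pvAllBits (n + 1)
    = (pvAllBits n).map (false :: ·) ++ (pvAllBits n).map (true :: ·) := rfl

theorem pvAllBits_snoc : ∀ n, pvAllBits (n + 1)
    = (pvAllBits n).flatMap (fun b => [b ++ [false], b ++ [true]]) := by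
  intro n
  induction n with
  | zero => rfl
  | succ n ih =>
    rw [pvAllBits_succ (n + 1)]
    conv_lhs => rw [ih]
    conv_rhs => rw [pvAllBits_succ n]
    simp [List.map_flatMap, List.flatMap_append, List.flatMap_map, Function.comp_def,
      List.cons_append]

theorem pvRange_two_mul : ∀ k, List.range (2 * k)
    = (List.range k).flatMap (fun j => [2 * j, 2 * j + 1]) := by
  intro k
  induction k with
  | zero => rfl
  | succ k ih =>
    have h1 : 2 * (k + 1) = (2 * k + 1) + 1 := by ring
    rw [h1, List.range_succ, List.range_succ, ih, List.range_succ, List.flatMap_append]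
    simp [List.append_assoc]

theorem pvToBits_two_mul₁ (n j : Nat) : pvToBits (n + 1) (2 * j) = pvToBits n j ++ [false] := by
  rw [pvToBits]
  have h1 : 2 * j / 2 = j := by omega
  have h2 : 2 * j % 2 = 0 := by omega
  rw [h1]; simp [h2]

theorem pvToBits_two_mul₂ (n j : Nat) : pvToBits (n + 1) (2 * j + 1) = pvToBits n j ++ [true] := by
  rw [pvToBits]
  have h1 : (2 * j + 1) / 2 = j := by omega
  have h2 : (2 * j + 1) % 2 = 1 := by omega
  rw [h1]; simp [h2]

theorem pvRange_map_toBits : ∀ n, (List.range (2 ^ n)).map (pvToBits n) = pvAllBits n := by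
  intro n
  induction n with
  | zero => rfl
  | succ n ih =>
    have h2 : 2 ^ (n + 1) = 2 * 2 ^ n := by ring
    rw [h2, pvRange_two_mul, List.map_flatMap, pvAllBits_snoc, ← ih, List.flatMap_map]
    congr 1
    funext j
    simp [pvToBits_two_mul₁, pvToBits_two_mul₂]

theorem pvToBits_length : ∀ n i, (pvToBits n i).length = n := by
  intro n
  induction n with
  | zero => intro i; rfl
  | succ n ih => intro i; rw [pvToBits]; simp [ih]

theorem pvSelo_replicate_false : ∀ n (cs : List Char) k,
    pvSelo (List.replicate n false) cs k = ([], []) := by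
  intro n
  induction n with
  | zero => intro cs k; rfl
  | succ n ih =>
    intro cs k
    cases cs with
    | nil => rfl
    | cons c cs => rw [List.replicate_succ]; exact ih cs (k + 1)

theorem pvSelo_ne_nil : ∀ (b : List Bool) (cs : List Char) k,
    b.length = cs.length → (pvSelo b cs k).1 = [] → ∀ x ∈ b, x = false := by
  intro b
  induction b with
  | nil => simp
  | cons x bs ih =>
    intro cs k hlen hsel
    cases cs with
    | nil => simp at hlen
    | cons c cs =>
      cases x with
      | true => simp [pvSelo] at hsel
      | false =>
        simp only [pvSelo] at hsel
        have := ih cs (k + 1) (by simpa using hlen) hsel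
        intro y hy
        rcases List.mem_cons.mp hy with h | h
        · exact h
        · exact this y h

theorem pvToBits_eq_zero : ∀ n i, i < 2 ^ n → (∀ x ∈ pvToBits n i, x = false) → i = 0 := by
  intro n
  induction n with
  | zero => intro i h _; omega
  | succ n ih =>
    intro i h hall
    rw [pvToBits] at hall
    simp only [List.mem_append, List.mem_singleton] at hall
    have h2 : 2 ^ (n + 1) = 2 * 2 ^ n := by ring
    have h1 : i / 2 = 0 := ih (i / 2) (by omega) (fun x hx => hall x (Or.inl hx))
    have hm := hall (decide (i % 2 = 1)) (Or.inr rfl)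
    simp at hm
    omega

-- A's per-iteration string and position entries
theorem pvAfold_distrib (cs : List Char) (n : Nat) :
    ∀ (l : List Nat) (r : List String) (p : List (List Int)) (bl : List (List Char)),
    l.foldl (fun (st : List String × List (List Int) × List (List Char)) i =>
      let binaryNum := pvPad (pvBin i) n
      let t := pvInner cs binaryNum n
      (st.1 ++ [String.ofList t.1],
       st.2.1 ++ [[((t.2.headD 0 : Nat) : Int), ((t.2.getLastD 0 : Nat) : Int)]],
       st.2.2 ++ [binaryNum])) (r, p, bl)
    = (r ++ l.map (fun i => String.ofList (pvInner cs (pvPad (pvBin i) n) n).1),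
       p ++ l.map (fun i => [(((pvInner cs (pvPad (pvBin i) n) n).2.headD 0 : Nat) : Int),
                             (((pvInner cs (pvPad (pvBin i) n) n).2.getLastD 0 : Nat) : Int)]),
       bl ++ l.map (fun i => pvPad (pvBin i) n)) := by
  intro l
  induction l with
  | nil => simp
  | cons i l ih =>
    intro r p bl
    simp only [List.foldl_cons, List.map_cons]
    rw [ih]
    simp

theorem pvEmitAll_cons (e : List Bool) (es : List (List Bool)) (cs : List Char) :
    pvEmitAll (e :: es) cs
    = ((pvEmit (pvSelo e cs 0).1 (pvSelo e cs 0).2).1 ++ (pvEmitAll es cs).1,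
       (pvEmit (pvSelo e cs 0).1 (pvSelo e cs 0).2).2 ++ (pvEmitAll es cs).2) := by
  simp [pvEmitAll]

theorem pvEmitAll_eq (cs : List Char) :
    ∀ (l : List Nat), (∀ i ∈ l, 1 ≤ i ∧ i < 2 ^ cs.length) →
    pvEmitAll (l.map (pvToBits cs.length)) cs
    = (l.map (fun i => String.ofList (pvInner cs (pvPad (pvBin i) cs.length) cs.length).1),
       l.map (fun i => [(((pvInner cs (pvPad (pvBin i) cs.length) cs.length).2.headD 0 : Nat) : Int),
                        (((pvInner cs (pvPad (pvBin i) cs.length) cs.length).2.getLastD 0 : Nat) : Int)])) := by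
  intro l
  induction l with
  | nil => simp [pvEmitAll]
  | cons i l ih =>
    intro hmem
    have hi := hmem i (List.mem_cons_self ..)
    have hrest : ∀ j ∈ l, 1 ≤ j ∧ j < 2 ^ cs.length := fun j hj => hmem j (List.mem_cons_of_mem _ hj)
    have hlen : (pvToBits cs.length i).length = cs.length := pvToBits_length _ _
    have hpi : pvInner cs (pvPad (pvBin i) cs.length) cs.length
        = pvSelo (pvToBits cs.length i) cs 0 := by
      rw [pvPadBin cs.length i hi.2]
      have := pvInner_eq (pvToBits cs.length i) cs hlen
      rwa [hlen] at this
    have hne : (pvSelo (pvToBits cs.length i) cs 0).1 ≠ [] := by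
      intro hnil
      have hall := pvSelo_ne_nil (pvToBits cs.length i) cs 0 hlen hnil
      have := pvToBits_eq_zero cs.length i hi.2 hall
      omega
    rw [List.map_cons, pvEmitAll_cons, ih hrest]
    simp only [List.map_cons, hpi]
    rw [pvEmit]
    rw [if_neg (by simpa using hne)]
    simp

theorem pvGoB_general : ∀ (m : Nat) (cs : List Char) (i : Nat) (sel : List Char)
    (pos : List Nat) (acc : List String × List (List Int)), i + m = cs.length →
    pvGoB cs cs.length i sel pos acc
    = (acc.1 ++ (pvAllBits m).flatMap (fun e =>
         (pvEmit (sel ++ (pvSelo e (cs.drop i) i).1) (pos ++ (pvSelo e (cs.drop i) i).2)).1),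
       acc.2 ++ (pvAllBits m).flatMap (fun e =>
         (pvEmit (sel ++ (pvSelo e (cs.drop i) i).1) (pos ++ (pvSelo e (cs.drop i) i).2)).2)) := by
  intro m
  induction m with
  | zero =>
    intro cs i sel pos acc hm
    rw [pvGoB]
    rw [if_neg (by omega)]
    have hdrop : cs.drop i = [] := List.drop_of_length_le (by omega)
    simp only [hdrop, pvAllBits, List.flatMap_cons, List.flatMap_nil, pvSelo, List.append_nil]
    by_cases hs : sel.isEmpty
    · simp [hs, pvEmit]
    · simp [hs, pvEmit]
  | succ m ih =>
    intro cs i sel pos acc hm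
    have hi : i < cs.length := by omega
    rw [pvGoB, if_pos hi]
    rw [ih cs (i+1) sel pos acc (by omega),
        ih cs (i+1) (sel ++ [cs.getD i ' ']) (pos ++ [i]) _ (by omega)]
    have hdc : cs.drop i = cs[i] :: cs.drop (i + 1) := List.drop_eq_getElem_cons hi
    have hget : cs.getD i ' ' = cs[i] := by simp [List.getD, List.getElem?_eq_getElem, hi]
    show _ = (acc.1 ++ (pvAllBits (m+1)).flatMap _, acc.2 ++ (pvAllBits (m+1)).flatMap _)
    rw [show pvAllBits (m + 1)
        = (pvAllBits m).map (false :: ·) ++ (pvAllBits m).map (true :: ·) by rfl]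
    simp only [List.flatMap_append, List.flatMap_map, Function.comp_def, hdc, pvSelo, hget]
    simp [Prod.mk.injEq, List.append_assoc]

theorem pv_ports_eq (cs : List Char) :
    get_all_substrings (String.ofList cs) = get_all_substrings_alt (String.ofList cs) := by
  have htl : (String.ofList cs).toList = cs := by simp
  -- B side
  have hB : get_all_substrings_alt (String.ofList cs) = pvEmitAll (pvAllBits cs.length) cs := by
    rw [get_all_substrings_alt, htl]
    have := pvGoB_general cs.length cs 0 [] [] ([], []) (by omega)
    simp only [List.drop_zero, List.nil_append] at this
    rw [this]
    rfl
  -- A side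
  have hpos : 2 ^ cs.length - 1 + 1 = 2 ^ cs.length := by
    have := Nat.one_le_two_pow (n := cs.length); omega
  have hAll : pvAllBits cs.length
      = pvToBits cs.length 0 :: (List.range' 1 (2 ^ cs.length - 1)).map (pvToBits cs.length) := by
    rw [← pvRange_map_toBits, List.range_eq_range']
    rw [show 2 ^ cs.length = (2 ^ cs.length - 1) + 1 from hpos.symm, List.range'_succ]
    simp
  have hmem : ∀ i ∈ List.range' 1 (2 ^ cs.length - 1), 1 ≤ i ∧ i < 2 ^ cs.length := by
    intro i hi
    rw [List.mem_range'_1] at hi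
    omega
  rw [hB, hAll, pvEmitAll_cons, pvToBits_zero, pvSelo_replicate_false]
  rw [pvEmitAll_eq cs _ hmem]
  rw [get_all_substrings]
  simp only [htl]
  rw [pvAfold_distrib]
  simp [pvEmit]

-- ===== VERDICT (by name: the statement is the Claim_ definition above) =====
theorem get_all_substrings_spec : Claim_equal_get_all_substrings := by
  intro chars _
  unfold Spec_get_all_substrings
  have h : chars = String.ofList chars.toList := by simp
  rw [h]
  exact pv_ports_eq chars.toList
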